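-- pv_equiv track=rewrite | github.com/Travis-Hurley/py_unit_five | for_loops.py | count
-- ===== SOURCE A (Python) =====
-- def count(number1,number2):
--     test = ""
--     for x in range(number1,1+number2):
--         test += str(x)+(" ")
--     test2 = ""
--     for x in range(number2,number1-1,-1):
--         test2 += str(x)+(" ")
--     return "Counting up > "+str(test)+ "         " +"Counting down > "+str(test2)
-- ===== SOURCE B (Python) =====
-- def count(number1, number2):
--     def build(a, b):
--         # (up, down) strings for the inclusive range a..b
--         if a > b:
--             return ("", "")
--         if a == b:
--             t = str(a) + " "
--             return (t, t)
--         m = (a + b) // 2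
--         ul, dl = build(a, m)
--         ur, dr = build(m + 1, b)
--         return (ul + ur, dr + dl)
--
--     up, down = build(number1, number2)
--     return "Counting up > " + up + "         " + "Counting down > " + down
-- ===== Notes on version B (the rewrite author's own statement) =====
-- stated objective: alternative
-- what changed: Replaces A's two independent linear range loops with a divide-and-conquer recursion over the interval that returns the (up, down) string pair at once, concatenating the halves in order for the up string and swapped for the down string.
import Mathlib
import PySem

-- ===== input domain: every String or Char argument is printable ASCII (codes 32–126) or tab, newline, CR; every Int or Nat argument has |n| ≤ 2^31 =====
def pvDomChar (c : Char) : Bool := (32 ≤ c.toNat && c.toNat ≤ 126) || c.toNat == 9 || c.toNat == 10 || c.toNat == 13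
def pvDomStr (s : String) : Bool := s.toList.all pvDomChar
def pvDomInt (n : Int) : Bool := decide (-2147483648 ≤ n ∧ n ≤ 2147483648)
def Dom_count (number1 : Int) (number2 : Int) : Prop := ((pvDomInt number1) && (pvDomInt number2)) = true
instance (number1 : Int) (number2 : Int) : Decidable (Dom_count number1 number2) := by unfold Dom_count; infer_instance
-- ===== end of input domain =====

-- B replaces A's two linear range loops by a divide-and-conquer recursion over the
-- interval that builds the (up, down) string pair at once, swapping the halves for
-- the down string (objective: alternative).

-- ===== PORT A =====
def count (number1 : Int) (number2 : Int) : String :=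
  let test : String :=
    (PySem.List.pyRange number1 (1 + number2) 1).foldl
      (fun acc x => acc ++ (PySem.Int.toStr x ++ " ")) ""
  let test2 : String :=
    (PySem.List.pyRange number2 (number1 - 1) (-1)).foldl
      (fun acc x => acc ++ (PySem.Int.toStr x ++ " ")) ""
  "Counting up > " ++ test ++ "         " ++ "Counting down > " ++ test2

-- ===== PORT B =====
-- the midpoint lies strictly inside an interval with at least two points (termination)
theorem pvMid_lt (a b : Int) (h : a < b) :
    PySem.Int.floordiv (a + b) 2 < b ∧ a ≤ PySem.Int.floordiv (a + b) 2 := by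
  have h1 := PySem.Int.floordiv_mul_add_mod (a + b) 2
  have h2 := PySem.Int.mod_nonneg (a + b) (b := 2) (by omega)
  have h3 := PySem.Int.mod_lt (a + b) (b := 2) (by omega)
  omega

-- (up, down) strings for the inclusive range a..b
def pvBuild (a b : Int) : String × String :=
  if _hgt : a > b then ("", "")
  else if _heq : a = b then
    let t := PySem.Int.toStr a ++ " "
    (t, t)
  else
    let m := PySem.Int.floordiv (a + b) 2
    let l := pvBuild a m
    let r := pvBuild (m + 1) b
    (l.1 ++ r.1, r.2 ++ l.2)
termination_by (b + 1 - a).toNat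
decreasing_by
  · have := pvMid_lt a b (by omega); omega
  · have := pvMid_lt a b (by omega); omega

def count_alt (number1 : Int) (number2 : Int) : String :=
  let p := pvBuild number1 number2
  "Counting up > " ++ p.1 ++ "         " ++ "Counting down > " ++ p.2

-- ===== PRECONDITION & SPEC =====
def Spec_count (number1 : Int) (number2 : Int) (out : String) : Prop := out = count_alt number1 number2
instance (number1 : Int) (number2 : Int) (out : String) : Decidable (Spec_count number1 number2 out) := by unfold Spec_count; infer_instance

-- ===== CLAIM =====
def Claim_equal_count : Prop := ∀ (number1 : Int) (number2 : Int), Dom_count number1 number2 → Spec_count number1 number2 (count number1 number2)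

-- ===== LEMMAS AND PROOFS =====

-- the token-appending fold over the up-range a..b, and the same fold over its reversal
def pvUp (a b : Int) : String :=
  (PySem.List.pyRange a (b + 1) 1).foldl (fun acc x => acc ++ (PySem.Int.toStr x ++ " ")) ""

def pvDown (a b : Int) : String :=
  (PySem.List.pyRange a (b + 1) 1).reverse.foldl (fun acc x => acc ++ (PySem.Int.toStr x ++ " ")) ""

-- the initial accumulator of an appending fold factors out to the front
theorem pv_foldl_shift {α : Type} (f : α → String) (l : List α) (init : String) :
    l.foldl (fun acc x => acc ++ f x) init = init ++ l.foldl (fun acc x => acc ++ f x) "" := by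
  induction l generalizing init with
  | nil => simp
  | cons a l ih => simp [List.foldl, ih (init ++ f a), ih (f a), String.append_assoc]

-- the appending fold distributes over list concatenation
theorem pv_foldl_concat {α : Type} (f : α → String) (l1 l2 : List α) :
    (l1 ++ l2).foldl (fun acc x => acc ++ f x) ""
      = l1.foldl (fun acc x => acc ++ f x) "" ++ l2.foldl (fun acc x => acc ++ f x) "" := by
  rw [List.foldl_append, pv_foldl_shift]

-- splitting the up-range at the midpoint splits pvUp / pvDown
theorem pvUp_split (a m b : Int) (h1 : a ≤ m) (h2 : m ≤ b) :
    pvUp a b = pvUp a m ++ pvUp (m + 1) b := by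
  unfold pvUp
  rw [PySem.List.pyRange_one_append a (m + 1) (b + 1) (by omega) (by omega), pv_foldl_concat]

theorem pvDown_split (a m b : Int) (h1 : a ≤ m) (h2 : m ≤ b) :
    pvDown a b = pvDown (m + 1) b ++ pvDown a m := by
  unfold pvDown
  rw [PySem.List.pyRange_one_append a (m + 1) (b + 1) (by omega) (by omega),
      List.reverse_append, pv_foldl_concat]

-- pvBuild computes exactly the two folds A performs
theorem pvBuild_eq (a b : Int) : pvBuild a b = (pvUp a b, pvDown a b) := by
  rw [pvBuild]
  by_cases hgt : a > b
  · simp only [hgt, dite_true]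
    rw [pvUp, pvDown, PySem.List.pyRange_one_eq_nil (by omega)]
    simp
  · simp only [hgt, dite_false]
    by_cases heq : a = b
    · simp only [heq, dite_true]
      rw [pvUp, pvDown, PySem.List.pyRange_one_singleton]
      simp [List.foldl]
    · simp only [heq, dite_false]
      have hab : a < b := by omega
      have hm := pvMid_lt a b hab
      rw [pvBuild_eq a (PySem.Int.floordiv (a + b) 2),
          pvBuild_eq (PySem.Int.floordiv (a + b) 2 + 1) b]
      rw [pvUp_split a (PySem.Int.floordiv (a + b) 2) b (by omega) (by omega),
          pvDown_split a (PySem.Int.floordiv (a + b) 2) b (by omega) (by omega)]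
termination_by (b + 1 - a).toNat
decreasing_by
  · have := pvMid_lt a b (by omega); omega
  · have := pvMid_lt a b (by omega); omega

-- ===== VERDICT =====
theorem count_spec : Claim_equal_count := by
  intro number1 number2 _
  show count number1 number2 = count_alt number1 number2
  unfold count count_alt
  rw [pvBuild_eq, PySem.List.pyRange_neg_one_eq_reverse]
  have h1 : number1 - 1 + 1 = number1 := by ring
  rw [h1, add_comm 1 number2]
  rfl
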